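-- pv_equiv track=rewrite | github.com/chlwlstlf/CodingTest-Study | 프로그래머스/2/389479. 서버 증설 횟수/서버 증설 횟수.py | solution
-- ===== SOURCE A (Python) =====
-- def solution(players, m, k):
--     answer = []
--     for p in players:
--         cnt = 0
--         for i in range(len(answer)):
--             if answer[i] > 0:
--                 answer[i] -= 1
--             if answer[i] > 0:
--                 cnt += 1
--         if p//m > cnt:
--             answer += [k]*(p//m-cnt)
--     return len(answer)
-- ===== SOURCE B (Python) =====
-- def solution(players, m, k):
--     w = max(k - 1, 0)          # hours during which a new server still counts as active
--     pre = [0]                  # prefix sums of per-hour server creations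
--     total = 0
--     for i, p in enumerate(players):
--         lo = max(i - w, 0)
--         active = pre[i] - pre[lo]
--         c = p // m - active
--         if c < 0:
--             c = 0
--         total += c
--         pre.append(pre[i] + c)
--     return total
-- ===== Notes on version B (the rewrite author's own statement) =====
-- stated objective: alternative
-- what changed: Instead of rescanning and decrementing the whole list of live server lifetimes every hour, B keeps a prefix-sum list of per-hour server creations and reads the active count as a sliding-window sum over the last k-1 hours.
import Mathlib
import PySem

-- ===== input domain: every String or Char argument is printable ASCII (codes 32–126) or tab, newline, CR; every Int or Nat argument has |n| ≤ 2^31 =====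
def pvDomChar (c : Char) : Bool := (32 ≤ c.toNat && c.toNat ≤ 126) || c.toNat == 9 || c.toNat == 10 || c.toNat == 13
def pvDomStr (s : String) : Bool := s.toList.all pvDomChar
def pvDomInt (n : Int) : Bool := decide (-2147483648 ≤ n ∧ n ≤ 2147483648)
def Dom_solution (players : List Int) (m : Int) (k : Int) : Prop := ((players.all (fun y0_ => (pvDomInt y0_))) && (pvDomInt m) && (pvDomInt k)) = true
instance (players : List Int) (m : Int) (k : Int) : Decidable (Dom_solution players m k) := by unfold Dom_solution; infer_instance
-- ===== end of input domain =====

-- B replaces A's per-hour rescan-and-decrement of the list of live server lifetimes by a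
-- prefix-sum sliding window over per-hour creation counts (alternative algorithm).

-- ===== PORT A =====
-- x after Python's "if answer[i] > 0: answer[i] -= 1"
def pvDec (x : Int) : Int := if 0 < x then x - 1 else x

-- A's inner loop over indices of answer: decrement-in-place, then count entries still > 0
def pvInner (answer : List Int) : List Int × Int :=
  answer.foldl (fun st x =>
    let y := pvDec x
    (st.1 ++ [y], st.2 + if 0 < y then 1 else 0)) ([], 0)

-- A's outer-loop body for one hour p
def pvStepA (m k : Int) (answer : List Int) (p : Int) : List Int :=
  let r := pvInner answer
  let q := PySem.Int.floordiv p m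
  if r.2 < q then r.1 ++ List.replicate (q - r.2).toNat k else r.1

def solution (players : List Int) (m : Int) (k : Int) : Int :=
  ((players.foldl (pvStepA m k) []).length : Int)

-- ===== PORT B =====
-- B's loop body: state (pre, total, i); pre = prefix sums of per-hour creations
def pvStepB (m k : Int) (st : List Int × Int × Nat) (p : Int) : List Int × Int × Nat :=
  let pre := st.1
  let total := st.2.1
  let i := st.2.2
  let w : Int := max (k - 1) 0
  let lo : Nat := ((i : Int) - w).toNat        -- = max(i - w, 0), exact since w ≥ 0
  let active := pre.getD i 0 - pre.getD lo 0   -- pre[i] - pre[lo], indices always in range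
  let c0 := PySem.Int.floordiv p m - active
  let c := if c0 < 0 then 0 else c0
  (pre ++ [pre.getD i 0 + c], total + c, i + 1)

def solution_alt (players : List Int) (m : Int) (k : Int) : Int :=
  (players.foldl (pvStepB m k) ([0], 0, 0)).2.1

-- ===== PRECONDITION & SPEC =====
-- Pre_ excludes exactly the inputs on which Python's p//m raises ZeroDivisionError:
-- m = 0 with at least one hour to process.
def Pre_solution (players : List Int) (m : Int) (k : Int) : Prop := players = [] ∨ m ≠ 0
instance (players : List Int) (m : Int) (k : Int) : Decidable (Pre_solution players m k) := by
  unfold Pre_solution; infer_instance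

def pvWitness_solution : List Int × Int × Int := ([10, 5, 3], 2, 2)

def Spec_solution (players : List Int) (m : Int) (k : Int) (out : Int) : Prop := out = solution_alt players m k
instance (players : List Int) (m : Int) (k : Int) (out : Int) : Decidable (Spec_solution players m k out) := by unfold Spec_solution; infer_instance

-- ===== CLAIM (what is proved, stated in full; the proofs are below) =====
def Claim_equal_solution : Prop := ∀ (players : List Int) (m : Int) (k : Int), Dom_solution players m k → Pre_solution players m k → Spec_solution players m k (solution players m k)

-- ===== LEMMAS AND PROOFS =====

-- value of an A-side server entry created "age" hours ago (after "age" decrement passes)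
def pvVal (k : Int) (a : Nat) : Int := if 0 < k then max (k - (a : Int)) 0 else k

-- A's answer list, reconstructed from the per-hour creation counts hist (oldest first),
-- each entry additionally aged by off decrement passes
def pvAge (k : Int) (off : Nat) : List Nat → List Int
  | [] => []
  | c :: rest => List.replicate c (pvVal k (off + rest.length)) ++ pvAge k off rest

-- count of entries that survive one more decrement pass
def pvCnt : List Int → Int
  | [] => 0
  | x :: xs => (if 0 < pvDec x then 1 else 0) + pvCnt xs

-- window sum: creations of the last (k-1) hours
def pvW (k : Int) : List Nat → Int
  | [] => 0
  | c :: rest => (if (rest.length : Int) ≤ k - 2 then (c : Int) else 0) + pvW k rest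

-- reference: total servers created over the remaining hours, given history hist
def pvRun (m k : Int) (hist : List Nat) : List Int → Int
  | [] => 0
  | p :: rest =>
    let q := PySem.Int.floordiv p m
    let cnt := pvW k hist
    if cnt < q then (q - cnt) + pvRun m k (hist ++ [(q - cnt).toNat]) rest
    else pvRun m k (hist ++ [0]) rest

-- prefix-sum list of hist starting from s
def pvPres (s : Int) : List Nat → List Int
  | [] => [s]
  | c :: rest => s :: pvPres (s + (c : Int)) rest

theorem pvInner_aux (xs : List Int) : ∀ (acc : List Int) (n : Int),
    xs.foldl (fun st x => let y := pvDec x; (st.1 ++ [y], st.2 + if 0 < y then 1 else 0)) (acc, n)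
      = (acc ++ xs.map pvDec, n + pvCnt xs) := by
  induction xs with
  | nil => simp [pvCnt]
  | cons x xs ih =>
    intro acc n
    simp only [List.foldl_cons, List.map_cons, pvCnt, ih]
    rw [Prod.mk.injEq]
    exact ⟨by simp, by ring⟩

theorem pvInner_eq (xs : List Int) : pvInner xs = (xs.map pvDec, pvCnt xs) := by
  simpa using pvInner_aux xs [] 0

theorem pvDec_val (k : Int) (a : Nat) : pvDec (pvVal k a) = pvVal k (a + 1) := by
  simp only [pvDec, pvVal]
  split_ifs <;> push_cast <;> omega

theorem pvMap_dec_age (k : Int) (off : Nat) (hist : List Nat) :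
    (pvAge k off hist).map pvDec = pvAge k (off + 1) hist := by
  induction hist with
  | nil => simp [pvAge]
  | cons c rest ih =>
    simp only [pvAge, List.map_append, List.map_replicate, pvDec_val, ih]
    have : off + rest.length + 1 = off + 1 + rest.length := by omega
    rw [this]

theorem pvPred_val (k : Int) (r : Nat) : (0 < pvDec (pvVal k r)) ↔ ((r : Int) ≤ k - 2) := by
  simp only [pvDec, pvVal]
  split_ifs <;> omega

theorem pvCnt_append (a b : List Int) : pvCnt (a ++ b) = pvCnt a + pvCnt b := by
  induction a with
  | nil => simp [pvCnt]
  | cons x xs ih => simp [pvCnt, ih]; ring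

theorem pvCnt_replicate (n : Nat) (v : Int) :
    pvCnt (List.replicate n v) = if 0 < pvDec v then (n : Int) else 0 := by
  induction n with
  | zero => simp [pvCnt]
  | succ n ih => simp [List.replicate_succ, pvCnt, ih]; split_ifs <;> push_cast <;> ring

theorem pvCnt_age (k : Int) (hist : List Nat) : pvCnt (pvAge k 0 hist) = pvW k hist := by
  induction hist with
  | nil => simp [pvAge, pvCnt, pvW]
  | cons c rest ih =>
    simp only [pvAge, pvW, pvCnt_append, pvCnt_replicate, ih, Nat.zero_add]
    by_cases h : (rest.length : Int) ≤ k - 2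
    · rw [if_pos ((pvPred_val k rest.length).mpr h), if_pos h]
    · rw [if_neg (fun hc => h ((pvPred_val k rest.length).mp hc)), if_neg h]

theorem pvVal_zero (k : Int) : pvVal k 0 = k := by
  simp only [pvVal]; split_ifs <;> omega

theorem pvAge_snoc (k : Int) (hist : List Nat) (c : Nat) :
    pvAge k 0 (hist ++ [c]) = pvAge k 1 hist ++ List.replicate c k := by
  induction hist with
  | nil => simp [pvAge, pvVal_zero]
  | cons c' rest ih =>
    simp only [List.cons_append, pvAge, List.length_append, List.length_cons, ih,
      List.append_assoc, List.length_nil]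
    have : 0 + (rest.length + (0 + 1)) = 1 + rest.length := by omega
    rw [this]

theorem pvAge_len (k : Int) (off : Nat) (hist : List Nat) :
    (pvAge k off hist).length = hist.sum := by
  induction hist with
  | nil => simp [pvAge]
  | cons c rest ih => simp [pvAge, ih, List.sum_cons]

theorem pvW_all (k : Int) (hist : List Nat) (h : (hist.length : Int) ≤ k - 1) :
    pvW k hist = (hist.sum : Int) := by
  induction hist with
  | nil => simp [pvW]
  | cons c rest ih =>
    simp only [List.length_cons] at h
    simp only [pvW, List.sum_cons]
    rw [if_pos (by push_cast at h ⊢; omega), ih (by push_cast at h ⊢; omega)]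
    push_cast; ring

theorem pvW_drop (k : Int) (hist : List Nat) :
    pvW k hist = ((hist.drop ((hist.length : Int) - max (k - 1) 0).toNat).sum : Int) := by
  induction hist with
  | nil => simp [pvW]
  | cons c rest ih =>
    by_cases h : (rest.length : Int) ≤ k - 2
    · have h0 : (((c :: rest).length : Int) - max (k - 1) 0).toNat = 0 := by
        simp only [List.length_cons]; push_cast; omega
      rw [h0]
      simp only [List.drop_zero, pvW, List.sum_cons]
      rw [if_pos h, pvW_all k rest (by omega)]
      push_cast; ring
    · have h1 : (((c :: rest).length : Int) - max (k - 1) 0).toNat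
          = ((rest.length : Int) - max (k - 1) 0).toNat + 1 := by
        simp only [List.length_cons]; push_cast; omega
      rw [h1]
      simp only [List.drop_succ_cons, pvW]
      rw [if_neg h, ih]
      ring

theorem pvPres_snoc (s : Int) (hist : List Nat) (c : Nat) :
    pvPres s (hist ++ [c]) = pvPres s hist ++ [s + (hist.sum : Int) + (c : Int)] := by
  induction hist generalizing s with
  | nil => simp [pvPres]
  | cons c' rest ih =>
    simp only [List.cons_append, pvPres, ih, List.sum_cons]
    push_cast
    congr 4
    ring

theorem pvPres_getD (hist : List Nat) : ∀ (s : Int) (j : Nat), j ≤ hist.length →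
    (pvPres s hist).getD j 0 = s + ((hist.take j).sum : Int) := by
  induction hist with
  | nil =>
    intro s j hj
    simp only [List.length_nil, Nat.le_zero] at hj
    subst hj
    simp [pvPres]
  | cons c rest ih =>
    intro s j hj
    cases j with
    | zero => simp [pvPres]
    | succ j =>
      simp only [pvPres, List.getD_cons_succ, List.take_succ_cons, List.sum_cons]
      rw [ih (s + c) j (by simpa using hj)]
      push_cast; ring

theorem pvLoopA (m k : Int) (rest : List Int) : ∀ (hist : List Nat),
    ((rest.foldl (pvStepA m k) (pvAge k 0 hist)).length : Int)
      = (hist.sum : Int) + pvRun m k hist rest := by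
  induction rest with
  | nil => intro hist; simp [pvRun, pvAge_len]
  | cons p rest ih =>
    intro hist
    simp only [List.foldl_cons, pvRun]
    have hstep : pvStepA m k (pvAge k 0 hist) p =
        if pvW k hist < PySem.Int.floordiv p m then
          pvAge k 0 (hist ++ [(PySem.Int.floordiv p m - pvW k hist).toNat])
        else pvAge k 0 (hist ++ [0]) := by
      simp only [pvStepA, pvInner_eq, pvMap_dec_age, pvCnt_age, pvAge_snoc,
        List.replicate_zero, List.append_nil]
    rw [hstep]
    by_cases h : pvW k hist < PySem.Int.floordiv p m
    · rw [if_pos h, if_pos h, ih]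
      have : (((PySem.Int.floordiv p m - pvW k hist).toNat : Int)) =
          PySem.Int.floordiv p m - pvW k hist := by omega
      simp only [List.sum_append, List.sum_cons, List.sum_nil]
      push_cast
      omega
    · rw [if_neg h, if_neg h, ih]
      simp only [List.sum_append, List.sum_cons, List.sum_nil]
      push_cast
      ring

theorem pvLoopB (m k : Int) (rest : List Int) : ∀ (hist : List Nat) (t : Int),
    (rest.foldl (pvStepB m k) (pvPres 0 hist, t, hist.length)).2.1
      = t + pvRun m k hist rest := by
  induction rest with
  | nil => intro hist t; simp [pvRun]
  | cons p rest ih =>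
    intro hist t
    simp only [List.foldl_cons, pvRun]
    have hlo : (((hist.length : Int) - max (k - 1) 0).toNat) ≤ hist.length := by omega
    have hpre_i : (pvPres 0 hist).getD hist.length 0 = (hist.sum : Int) := by
      rw [pvPres_getD hist 0 hist.length le_rfl]; simp
    have hpre_lo : (pvPres 0 hist).getD (((hist.length : Int) - max (k - 1) 0).toNat) 0
        = ((hist.take (((hist.length : Int) - max (k - 1) 0).toNat)).sum : Int) := by
      rw [pvPres_getD hist 0 _ hlo]; simp
    have hactive : (hist.sum : Int)
        - ((hist.take (((hist.length : Int) - max (k - 1) 0).toNat)).sum : Int)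
        = pvW k hist := by
      rw [pvW_drop k hist]
      have := List.take_append_drop (((hist.length : Int) - max (k - 1) 0).toNat) hist
      have hs : (hist.take (((hist.length : Int) - max (k - 1) 0).toNat)).sum
          + (hist.drop (((hist.length : Int) - max (k - 1) 0).toNat)).sum = hist.sum := by
        conv_rhs => rw [← this]
        rw [List.sum_append]
      push_cast [← hs]
      ring
    have hstep : pvStepB m k (pvPres 0 hist, t, hist.length) p =
        if pvW k hist < PySem.Int.floordiv p m then
          (pvPres 0 (hist ++ [(PySem.Int.floordiv p m - pvW k hist).toNat]),
            t + (PySem.Int.floordiv p m - pvW k hist), hist.length + 1)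
        else (pvPres 0 (hist ++ [0]), t, hist.length + 1) := by
      simp only [pvStepB, hpre_i, hpre_lo, hactive]
      by_cases h : pvW k hist < PySem.Int.floordiv p m
      · rw [if_pos h, if_neg (show ¬(PySem.Int.floordiv p m - pvW k hist < 0) by omega),
          pvPres_snoc,
          show ((0:Int) + (hist.sum : Int)
              + (((PySem.Int.floordiv p m - pvW k hist).toNat : Nat) : Int)
            = (hist.sum : Int) + (PySem.Int.floordiv p m - pvW k hist)) by omega]
      · rw [if_neg h,
          show ((if PySem.Int.floordiv p m - pvW k hist < 0 then (0:Int)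
              else PySem.Int.floordiv p m - pvW k hist) = 0) by split_ifs <;> omega,
          pvPres_snoc,
          show ((0:Int) + (hist.sum : Int) + (((0:Nat)) : Int)
            = (hist.sum : Int) + 0) by omega]
        simp
    rw [hstep]
    by_cases h : pvW k hist < PySem.Int.floordiv p m
    · rw [if_pos h, if_pos h]
      have := ih (hist ++ [(PySem.Int.floordiv p m - pvW k hist).toNat])
        (t + (PySem.Int.floordiv p m - pvW k hist))
      simp only [List.length_append, List.length_cons, List.length_nil] at this
      rw [this]
      ring
    · rw [if_neg h, if_neg h]
      have := ih (hist ++ [0]) t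
      simp only [List.length_append, List.length_cons, List.length_nil] at this
      rw [this]

-- ===== VERDICT (by name: the statement is the Claim_ definition above) =====
theorem solution_spec : Claim_equal_solution := by
  intro players m k _hdom _hpre
  unfold Spec_solution solution solution_alt
  have hA := pvLoopA m k players []
  have hB := pvLoopB m k players [] 0
  simp only [pvAge, List.sum_nil, Nat.cast_zero, zero_add] at hA
  simp only [pvPres, List.length_nil, zero_add] at hB
  rw [hA, hB]
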